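-- pv_equiv track=rewrite | github.com/twinelms/1prob_per_day | 1063.py | validSubarrays
-- ===== SOURCE A (Python) =====
-- from typing import List
--
-- def validSubarrays(nums: List[int]) -> int:
--     first_small = [len(nums)]*len(nums)
--     stack = []
--     for i, n in enumerate(nums):
--         while stack and stack[-1][1] > n:
--             first_small[stack.pop()[0]] = i
--         stack.append((i,n))
--     res = 0
--     for start, end in enumerate(first_small):
--         res += end-start
--     return res
-- ===== SOURCE B (Python) =====
-- from typing import List
--
-- def validSubarrays(nums: List[int]) -> int:
--     n = len(nums)
--     res = 0
--     for i in range(n):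
--         j = i + 1
--         while j < n and nums[j] >= nums[i]:
--             j += 1
--         res += j - i
--     return res
-- ===== Notes on version B (the rewrite author's own statement) =====
-- stated objective: simpler
-- what changed: Replaces the monotonic stack and the first_small index table with a direct two-loop scan: for each start index, walk right while elements stay >= nums[start] and add the run length.
import Mathlib
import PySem

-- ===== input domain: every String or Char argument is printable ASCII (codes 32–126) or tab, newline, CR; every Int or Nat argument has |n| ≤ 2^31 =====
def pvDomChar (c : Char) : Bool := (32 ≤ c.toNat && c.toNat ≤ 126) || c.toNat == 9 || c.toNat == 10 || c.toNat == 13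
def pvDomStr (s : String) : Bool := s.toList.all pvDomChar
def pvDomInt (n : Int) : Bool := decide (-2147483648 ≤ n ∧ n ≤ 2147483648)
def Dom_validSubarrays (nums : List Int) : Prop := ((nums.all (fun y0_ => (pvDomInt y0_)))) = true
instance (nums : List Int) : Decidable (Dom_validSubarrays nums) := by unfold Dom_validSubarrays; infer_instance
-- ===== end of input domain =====

-- B replaces A's monotonic stack + first_small table with a plain two-loop scan
-- (for each start, walk right while elements stay >= nums[start]); simpler, not faster.

-- ===== PORT A =====
-- inner 'while stack and stack[-1][1] > n: first_small[stack.pop()[0]] = i'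
-- (stack head = Python stack[-1]; list assignment via PySem.List.pySetD)
def pvPopLoop (fs : List Int) (stack : List (Int × Int)) (i n : Int) :
    List Int × List (Int × Int) :=
  match stack with
  | [] => (fs, [])
  | (j, v) :: rest =>
      if v > n then pvPopLoop (PySem.List.pySetD fs j i) rest i n
      else (fs, (j, v) :: rest)

def validSubarrays (nums : List Int) : Int :=
  let fs0 := List.replicate nums.length ((nums.length : Int))
  let st :=
    (PySem.List.enumerate nums 0).foldl
      (fun (st : List Int × List (Int × Int)) p =>
        let r := pvPopLoop st.1 st.2 p.1 p.2
        (r.1, (p.1, p.2) :: r.2))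
      (fs0, [])
  (PySem.List.enumerate st.1 0).foldl (fun res p => res + (p.2 - p.1)) 0

-- ===== PORT B =====
-- inner 'while j < n and nums[j] >= nums[i]: j += 1'
def pvScanB (nums : List Int) (vi : Int) (j : Int) : Int :=
  if h : j < (nums.length : Int) ∧ PySem.List.pyGetD nums j 0 ≥ vi then
    pvScanB nums vi (j + 1)
  else j
termination_by ((nums.length : Int) - j).toNat
decreasing_by omega

def validSubarrays_alt (nums : List Int) : Int :=
  (PySem.List.pyRange 0 (nums.length : Int) 1).foldl
    (fun res i => res + (pvScanB nums (PySem.List.pyGetD nums i 0) (i + 1) - i)) 0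

-- ===== PRECONDITION & SPEC =====
def Spec_validSubarrays (nums : List Int) (out : Int) : Prop := out = validSubarrays_alt nums
instance (nums : List Int) (out : Int) : Decidable (Spec_validSubarrays nums out) := by unfold Spec_validSubarrays; infer_instance

-- ===== CLAIM (what is proved, stated in full; the proofs are below) =====
def Claim_equal_validSubarrays : Prop := ∀ (nums : List Int), Dom_validSubarrays nums → Spec_validSubarrays nums (validSubarrays nums)

-- ===== LEMMAS AND PROOFS =====

-- value at a (Nat) position
def pvVal (nums : List Int) (k : Nat) : Int := nums.getD k 0

-- j "survives" the first i elements: nothing strictly smaller after it up to i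
def pvSurv (nums : List Int) (i j : Nat) : Bool :=
  decide (∀ k, k < i → j < k → pvVal nums j ≤ pvVal nums k)

-- Nat version of B's inner scan
def pvScan (nums : List Int) (vk : Int) (j : Nat) : Nat :=
  if j < nums.length ∧ vk ≤ pvVal nums j then pvScan nums vk (j + 1) else j
termination_by nums.length - j
decreasing_by omega

def pvFsN (nums : List Int) (k : Nat) : Nat := pvScan nums (pvVal nums k) (k + 1)

-- the stack after processing i elements
def pvStackSpec (nums : List Int) (i : Nat) : List (Int × Int) :=
  (((List.range i).filter (fun j => pvSurv nums i j)).reverse).map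
    (fun (j : Nat) => ((j : Int), pvVal nums j))

-- the first_small list after processing i elements
def pvFsSpec (nums : List Int) (i : Nat) : List Int :=
  (List.range nums.length).map
    (fun j => if j < i ∧ ¬ pvSurv nums i j then ((pvFsN nums j : Nat) : Int)
              else ((nums.length : Nat) : Int))

theorem pvScan_eq (nums : List Int) (vk : Int) (j t : Nat) (hjt : j ≤ t)
    (hmid : ∀ k, j ≤ k → k < t → k < nums.length ∧ vk ≤ pvVal nums k)
    (hstop : ¬ (t < nums.length ∧ vk ≤ pvVal nums t)) :
    pvScan nums vk j = t := by
  rcases Nat.lt_or_ge j t with h | h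
  · rw [pvScan]
    have := hmid j le_rfl h
    rw [if_pos this]
    exact pvScan_eq nums vk (j+1) t h (fun k hk1 hk2 => hmid k (by omega) hk2) hstop
  · have : j = t := le_antisymm hjt h
    subst this
    rw [pvScan, if_neg hstop]
termination_by t - j

theorem pvScanB_eq (nums : List Int) (vk : Int) (j : Nat) :
    pvScanB nums vk (j : Int) = ((pvScan nums vk j : Nat) : Int) := by
  rw [pvScanB, pvScan]
  by_cases h : j < nums.length ∧ vk ≤ pvVal nums j
  · have hb : ((j : Int) < (nums.length : Int) ∧ PySem.List.pyGetD nums (j : Int) 0 ≥ vk) := by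
      refine ⟨by exact_mod_cast h.1, ?_⟩
      rw [PySem.List.pyGetD_natCast]
      exact h.2
    rw [dif_pos hb, if_pos h]
    have := pvScanB_eq nums vk (j + 1)
    simpa using this
  · have hb : ¬ ((j : Int) < (nums.length : Int) ∧ PySem.List.pyGetD nums (j : Int) 0 ≥ vk) := by
      rw [PySem.List.pyGetD_natCast]
      intro hc
      exact h ⟨by exact_mod_cast hc.1, hc.2⟩
    rw [dif_neg hb, if_neg h]
termination_by (nums.length - j)
decreasing_by omega

-- behaviour of the pop loop on a stack of (index, value) pairs
theorem pvPopLoop_spec (nums : List Int) (i : Nat) (r : List Nat) (fs : List Int) :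
    pvPopLoop fs (r.map (fun (j : Nat) => ((j : Int), pvVal nums j))) (i : Int) (pvVal nums i) =
      ((r.takeWhile (fun j => pvVal nums i < pvVal nums j)).foldl
          (fun f (j : Nat) => PySem.List.pySetD f (j : Int) (i : Int)) fs,
       (r.dropWhile (fun j => pvVal nums i < pvVal nums j)).map
          (fun (j : Nat) => ((j : Int), pvVal nums j))) := by
  induction r generalizing fs with
  | nil => simp [pvPopLoop]
  | cons a rest ih =>
      by_cases h : pvVal nums i < pvVal nums a
      · simp only [List.map_cons, pvPopLoop, if_pos h, List.takeWhile_cons, List.dropWhile_cons,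
          decide_eq_true h, List.foldl_cons]
        exact ih _
      · simp only [List.map_cons, pvPopLoop, if_neg h, List.takeWhile_cons, List.dropWhile_cons]
        simp [h]

-- on a list whose predicate truth is monotone (true entries form a prefix),
-- takeWhile/dropWhile are filters
theorem takeWhile_eq_filter_of_mono {α : Type} (p : α → Bool) (l : List α)
    (h : l.Pairwise (fun a b => p b = true → p a = true)) :
    l.takeWhile p = l.filter p ∧ l.dropWhile p = l.filter (fun x => ! p x) := by
  induction l with
  | nil => simp
  | cons a rest ih =>
      rcases List.pairwise_cons.mp h with ⟨ha, hrest⟩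
      by_cases hp : p a = true
      · have := ih hrest
        simp [List.takeWhile_cons, List.dropWhile_cons, List.filter_cons, hp, this.1, this.2]
      · have hall : ∀ x ∈ rest, p x = false := by
          intro x hx
          by_contra hc
          exact hp (ha x hx (by simpa using hc))
        have h1 : rest.filter p = [] :=
          List.filter_eq_nil_iff.mpr (fun x hx => by simp [hall x hx])
        have h2 : rest.filter (fun x => ! p x) = rest :=
          List.filter_eq_self.mpr (fun x hx => by simp [hall x hx])
        constructor
        · simp [List.takeWhile_cons, hp, List.filter_cons, h1]
        · simp [List.dropWhile_cons, hp, List.filter_cons, h2]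

-- getD through a foldl of pySetD at distinct in-range indices
theorem getD_foldl_pySetD (i : Nat) (l : List Nat) (fs : List Int)
    (hlen : ∀ j ∈ l, j < fs.length) (m : Nat) :
    ((l.foldl (fun f (j : Nat) => PySem.List.pySetD f (j : Int) (i : Int)) fs).getD m 0) =
      if m ∈ l then (i : Int) else fs.getD m 0 := by
  induction l generalizing fs with
  | nil => simp
  | cons a rest ih =>
      have ha : a < fs.length := hlen a (List.mem_cons_self ..)
      have hset : PySem.List.pySetD fs (a : Int) (i : Int) = fs.set a (i : Int) :=
        PySem.List.pySetD_natCast ..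
      rw [List.foldl_cons, ih (PySem.List.pySetD fs (a : Int) (i : Int))
        (by intro j hj; rw [hset]; simpa using hlen j (List.mem_cons_of_mem _ hj))]
      rw [hset]
      by_cases hm : m ∈ rest
      · simp [hm]
      · by_cases hma : m = a
        · subst hma
          simp [hm, List.getD_eq_getElem?_getD, List.getElem?_set_self ha]
        · simp [hm, hma, List.getD_eq_getElem?_getD, Ne.symm hma]

theorem pvFsSpec_length (nums : List Int) (i : Nat) : (pvFsSpec nums i).length = nums.length := by
  simp [pvFsSpec]

theorem pvSurv_iff (nums : List Int) (i j : Nat) :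
    pvSurv nums i j = true ↔ (∀ k, k < i → j < k → pvVal nums j ≤ pvVal nums k) := by
  simp [pvSurv]

theorem pvSurv_succ (nums : List Int) (i j : Nat) (hj : j < i) :
    pvSurv nums (i+1) j = (pvSurv nums i j && decide (pvVal nums j ≤ pvVal nums i)) := by
  simp only [pvSurv, ← Bool.decide_and]
  rw [decide_eq_decide]
  constructor
  · intro h
    exact ⟨fun k hk1 hk2 => h k (by omega) hk2, h i (by omega) hj⟩
  · intro h k hk1 hk2
    rcases Nat.lt_or_ge k i with hk | hk
    · exact h.1 k hk hk2
    · have : k = i := by omega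
      subst this
      exact h.2

theorem pvFsSpec_getD (nums : List Int) (i j : Nat) (hj : j < nums.length) :
    (pvFsSpec nums i).getD j 0 =
      if j < i ∧ ¬ pvSurv nums i j then ((pvFsN nums j : Nat) : Int)
      else ((nums.length : Nat) : Int) := by
  simp [pvFsSpec, List.getD_eq_getElem?_getD, List.getElem?_range hj]

theorem pvFsN_popped (nums : List Int) (m i : Nat) (hm : m < i) (hi : i ≤ nums.length)
    (hsurv : pvSurv nums i m = true) (hlt : pvVal nums i < pvVal nums m) :
    pvFsN nums m = i := by
  apply pvScan_eq nums (pvVal nums m) (m+1) i (by omega)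
  · intro k hk1 hk2
    exact ⟨by omega, (pvSurv_iff nums i m).mp hsurv k hk2 (by omega)⟩
  · intro hcon
    omega

theorem length_foldl_pySetD (i : Nat) (l : List Nat) (fs : List Int) :
    (l.foldl (fun f (j : Nat) => PySem.List.pySetD f (j : Int) (i : Int)) fs).length = fs.length := by
  induction l generalizing fs with
  | nil => rfl
  | cons a rest ih => rw [List.foldl_cons, ih, PySem.List.length_pySetD]

-- the main invariant step
theorem pvStep (nums : List Int) (i : Nat) (hi : i < nums.length) :
    (let r := pvPopLoop (pvFsSpec nums i) (pvStackSpec nums i) (i : Int) (pvVal nums i)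
     (r.1, ((i : Int), pvVal nums i) :: r.2)) = (pvFsSpec nums (i+1), pvStackSpec nums (i+1)) := by
  have hlen := pvFsSpec_length nums i
  set p : Nat → Bool := fun j => decide (pvVal nums i < pvVal nums j) with hp
  set l : List Nat := (List.range i).filter (fun j => pvSurv nums i j) with hldef
  have hl_lt : ∀ j ∈ l, j < i := by
    intro j hj
    exact List.mem_range.mp (List.mem_of_mem_filter hj)
  have hl_surv : ∀ j ∈ l, pvSurv nums i j = true := by
    intro j hj
    exact List.of_mem_filter hj
  have hl_chain : l.Pairwise (· < ·) := (List.pairwise_lt_range).filter _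
  have hmono : l.Pairwise (fun a b => p a = true → p b = true) := by
    refine hl_chain.imp_of_mem ?_
    intro a b ha hb hab hpa
    have hba : pvVal nums a ≤ pvVal nums b :=
      (pvSurv_iff nums i a).mp (hl_surv a ha) b (hl_lt b hb) hab
    simp only [hp, decide_eq_true_eq] at hpa ⊢
    omega
  have hrev : l.reverse.Pairwise (fun a b => p b = true → p a = true) :=
    List.pairwise_reverse.mpr hmono
  obtain ⟨htw, hdw⟩ := takeWhile_eq_filter_of_mono p l.reverse hrev
  have hps := pvPopLoop_spec nums i l.reverse (pvFsSpec nums i)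
  have hstack : pvStackSpec nums i =
      l.reverse.map (fun (j : Nat) => ((j : Int), pvVal nums j)) := rfl
  -- the filter over range i with the successor predicate
  have hfilter_succ : l.filter (fun j => ! p j) = (List.range i).filter (fun j => pvSurv nums (i+1) j) := by
    rw [hldef, List.filter_filter]
    apply List.filter_congr
    intro j hj
    have hji : j < i := List.mem_range.mp hj
    rw [pvSurv_succ nums i j hji]
    cases hs : pvSurv nums i j <;> simp [hp, ← decide_not, not_lt]
  have hstack' : ((i : Int), pvVal nums i) ::
      (l.reverse.dropWhile p).map (fun (j : Nat) => ((j : Int), pvVal nums j)) =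
      pvStackSpec nums (i+1) := by
    rw [hdw, List.filter_reverse, hfilter_succ]
    have hsurv_i : pvSurv nums (i+1) i = true := by
      rw [pvSurv_iff]
      intro k hk1 hk2
      omega
    rw [pvStackSpec, List.range_succ, List.filter_append, List.filter_cons,
      if_pos hsurv_i]
    simp
  have hfs' : (l.reverse.takeWhile p).foldl
      (fun f (j : Nat) => PySem.List.pySetD f (j : Int) (i : Int)) (pvFsSpec nums i) =
      pvFsSpec nums (i+1) := by
    rw [htw]
    set popped : List Nat := l.reverse.filter p with hpopped
    have hmem : ∀ m : Nat, m ∈ popped ↔ (m < i ∧ pvSurv nums i m = true ∧ pvVal nums i < pvVal nums m) := by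
      intro m
      rw [hpopped, List.mem_filter, List.mem_reverse]
      constructor
      · intro ⟨h1, h2⟩
        exact ⟨hl_lt m h1, hl_surv m h1, by simpa [hp] using h2⟩
      · intro ⟨h1, h2, h3⟩
        refine ⟨?_, by simpa [hp] using h3⟩
        rw [hldef, List.mem_filter]
        exact ⟨List.mem_range.mpr h1, h2⟩
    apply List.ext_getElem
    · rw [length_foldl_pySetD i popped (pvFsSpec nums i), hlen, pvFsSpec_length]
    · intro m hm1 hm2
      have hmn : m < nums.length := by rwa [pvFsSpec_length] at hm2
      rw [← List.getD_eq_getElem _ 0 hm1, ← List.getD_eq_getElem _ 0 hm2]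
      rw [getD_foldl_pySetD i popped (pvFsSpec nums i)
        (fun j hj => by rw [hlen]; exact lt_of_lt_of_le (hl_lt j (List.mem_reverse.mp (List.mem_of_mem_filter hj))) (le_of_lt hi)) m]
      rw [pvFsSpec_getD nums i m hmn, pvFsSpec_getD nums (i+1) m hmn]
      by_cases hmp : m ∈ popped
      · obtain ⟨h1, h2, h3⟩ := (hmem m).mp hmp
        rw [if_pos hmp]
        have hnot : ¬ pvSurv nums (i+1) m = true := by
          rw [pvSurv_succ nums i m h1]
          simp only [Bool.and_eq_true, decide_eq_true_eq, not_and]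
          intro _
          omega
        rw [if_pos ⟨by omega, by simpa using hnot⟩,
          pvFsN_popped nums m i h1 (le_of_lt hi) h2 h3]
      · rw [if_neg hmp]
        rcases Nat.lt_trichotomy m i with hmi | hmi | hmi
        · by_cases hs : pvSurv nums i m = true
          · by_cases hle : pvVal nums m ≤ pvVal nums i
            · have hs' : pvSurv nums (i+1) m = true := by
                rw [pvSurv_succ nums i m hmi, hs]
                simpa using hle
              rw [if_neg (by simp [hs]), if_neg (by simp [hs'])]
            · exact absurd ((hmem m).mpr ⟨hmi, hs, by omega⟩) hmp
          · have hs' : ¬ pvSurv nums (i+1) m = true := by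
              rw [pvSurv_succ nums i m hmi]
              simp only [Bool.and_eq_true]
              intro hcon
              exact hs hcon.1
            rw [if_pos ⟨hmi, by simpa using hs⟩, if_pos ⟨by omega, by simpa using hs'⟩]
        · subst hmi
          have hsurv_m : pvSurv nums (m+1) m = true := by
            rw [pvSurv_iff]
            intro k hk1 hk2
            omega
          rw [if_neg (by omega), if_neg (by simp [hsurv_m])]
        · rw [if_neg (by omega), if_neg (by omega)]
  simp only [hstack, hps]
  exact Prod.ext hfs' hstack'

-- the A loop computes pvFsSpec at full length
theorem pvLoop_eq (nums : List Int) :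
    ((PySem.List.enumerate nums 0).foldl
      (fun (st : List Int × List (Int × Int)) p =>
        let r := pvPopLoop st.1 st.2 p.1 p.2
        (r.1, (p.1, p.2) :: r.2))
      (List.replicate nums.length ((nums.length : Int)), [])) =
    (pvFsSpec nums nums.length, pvStackSpec nums nums.length) := by
  have hE : PySem.List.enumerate nums 0 =
      (List.range nums.length).map (fun (k : Nat) => ((k : Int), pvVal nums k)) := by
    rw [PySem.List.enumerate_eq_map_pyRange nums 0]
    have hlen : PySem.List.len nums = ((nums.length : Nat) : Int) := by simp [pysem]
    rw [hlen, PySem.List.pyRange_zero_nat, List.map_map]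
    apply List.map_congr_left
    intro k _
    simp [PySem.List.pyGetD_natCast, pvVal]
  rw [hE]
  suffices h : ∀ i : Nat, i ≤ nums.length →
      ((List.range i).map (fun (k : Nat) => ((k : Int), pvVal nums k))).foldl
        (fun (st : List Int × List (Int × Int)) p =>
          let r := pvPopLoop st.1 st.2 p.1 p.2
          (r.1, (p.1, p.2) :: r.2))
        (List.replicate nums.length ((nums.length : Int)), []) =
      (pvFsSpec nums i, pvStackSpec nums i) by
    exact h nums.length le_rfl
  intro i hi
  induction i with
  | zero =>
      simp only [List.range_zero, List.map_nil, List.foldl_nil]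
      refine Prod.ext ?_ ?_
      · simp only [pvFsSpec]
        symm
        rw [List.eq_replicate_iff]
        refine ⟨by simp, ?_⟩
        intro b hb
        simp only [List.mem_map, List.mem_range] at hb
        obtain ⟨j, _, hbj⟩ := hb
        simpa using hbj.symm
      · simp [pvStackSpec]
  | succ i ih =>
      rw [List.range_succ, List.map_append, List.foldl_append, ih (by omega)]
      simp only [List.map_cons, List.map_nil, List.foldl_cons, List.foldl_nil]
      exact pvStep nums i (by omega)

-- final first_small entries all equal pvFsN
theorem pvFsSpec_final (nums : List Int) (j : Nat) (hj : j < nums.length) :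
    (pvFsSpec nums nums.length).getD j 0 = ((pvFsN nums j : Nat) : Int) := by
  rw [pvFsSpec_getD nums nums.length j hj]
  by_cases hs : pvSurv nums nums.length j = true
  · rw [if_neg (by simp [hs])]
    have : pvFsN nums j = nums.length := by
      apply pvScan_eq nums (pvVal nums j) (j+1) nums.length (by omega)
      · intro k hk1 hk2
        exact ⟨hk2, (pvSurv_iff nums nums.length j).mp hs k hk2 (by omega)⟩
      · intro hcon
        omega
    rw [this]
  · rw [if_pos ⟨hj, by simpa using hs⟩]

-- ===== VERDICT (by name: the statement is the Claim_ definition above) =====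
theorem validSubarrays_spec : Claim_equal_validSubarrays := by
  unfold Claim_equal_validSubarrays
  intro nums _
  unfold Spec_validSubarrays
  show validSubarrays nums = validSubarrays_alt nums
  rw [validSubarrays, validSubarrays_alt]
  rw [pvLoop_eq nums]
  have hlenfs : PySem.List.len (pvFsSpec nums nums.length) = ((nums.length : Nat) : Int) := by
    simp [pysem, pvFsSpec_length]
  rw [PySem.List.enumerate_eq_map_pyRange (pvFsSpec nums nums.length) 0, hlenfs,
    List.foldl_map]
  have hlennums : ((nums.length : Nat) : Int) = (nums.length : Int) := rfl
  apply PySem.List.foldl_congr_mem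
  intro acc x hx
  rw [PySem.List.mem_pyRange_one] at hx
  obtain ⟨hx0, hxn⟩ := hx
  obtain ⟨k, rfl⟩ := Int.eq_ofNat_of_zero_le hx0
  have hk : k < nums.length := by exact_mod_cast hxn
  rw [PySem.List.pyGetD_natCast (pvFsSpec nums nums.length) k 0,
    PySem.List.pyGetD_natCast nums k 0, pvFsSpec_final nums k hk]
  have hcast : ((k : Int) + 1) = (((k+1 : Nat) : Nat) : Int) := by push_cast; ring
  rw [hcast, pvScanB_eq nums (nums.getD k 0) (k+1)]
  rfl
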